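-- pv_equiv track=rewrite | github.com/fangda-max/openclaw-skills | skills/entropy-audit/assets/tool/entropy_audit/lang/java/details.py | _matched_prefixes
-- ===== SOURCE A (Python) =====
-- def _normalize_relative_path(relative_path: str) -> str:
--     normalized = str(relative_path).replace("\\", "/").strip().strip("/")
--     return "" if normalized == "." else normalized.lower()
--
-- def _matched_prefixes(relative_path: str, prefixes: list[str]) -> list[str]:
--     if not prefixes:
--         return []
--     normalized_path = _normalize_relative_path(relative_path)
--     if not normalized_path:
--         return []
--     return [
--         prefix
--         for prefix in prefixes
--         if normalized_path == prefix or normalized_path.startswith(f"{prefix}/")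
--     ]
-- ===== SOURCE B (Python) =====
-- def _normalize_relative_path(relative_path: str) -> str:
--     normalized = str(relative_path).replace("\\", "/").strip().strip("/")
--     return "" if normalized == "." else normalized.lower()
--
-- def _matched_prefixes(relative_path: str, prefixes: list[str]) -> list[str]:
--     if not prefixes:
--         return []
--     normalized = _normalize_relative_path(relative_path)
--     if not normalized:
--         return []
--     # Precompute the set of all ancestor prefixes of the normalized path:
--     # every slice that ends right before a '/', plus the full path.
--     ancestors = {normalized}
--     for i, ch in enumerate(normalized):
--         if ch == "/":
--             ancestors.add(normalized[:i])
--     return [p for p in prefixes if p in ancestors]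
-- ===== Notes on version B (the rewrite author's own statement) =====
-- stated objective: alternative
-- what changed: B precomputes the set of all ancestor prefixes of the normalized path (every slice ending just before a '/', plus the full path) in one scan and then filters the prefix list by set membership, instead of A's per-prefix string equality/startswith test.
import Mathlib
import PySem

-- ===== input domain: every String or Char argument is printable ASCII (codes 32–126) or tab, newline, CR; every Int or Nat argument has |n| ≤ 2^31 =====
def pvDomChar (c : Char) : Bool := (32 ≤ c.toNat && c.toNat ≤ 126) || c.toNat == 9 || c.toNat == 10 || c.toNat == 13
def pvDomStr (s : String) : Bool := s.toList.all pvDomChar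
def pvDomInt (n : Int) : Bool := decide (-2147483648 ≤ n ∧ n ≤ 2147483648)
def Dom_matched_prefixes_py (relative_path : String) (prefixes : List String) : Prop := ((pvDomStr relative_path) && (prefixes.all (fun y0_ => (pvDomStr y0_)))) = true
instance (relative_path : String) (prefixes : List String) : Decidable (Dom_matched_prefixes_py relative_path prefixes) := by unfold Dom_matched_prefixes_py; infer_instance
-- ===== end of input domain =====

-- B precomputes the set of ancestor prefixes of the normalized path once and filters by
-- set membership instead of A's per-prefix startswith test (alternative decomposition).

-- ===== PORT A =====
-- shared module helper _normalize_relative_path (used verbatim by both Pythons)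
def normalize_relative_path_py (relative_path : String) : String :=
  let normalized := PySem.Str.stripChars (PySem.Str.strip (PySem.Str.replace relative_path "\\" "/")) "/"
  if normalized == "." then "" else PySem.Str.lower normalized

def matched_prefixes_py (relative_path : String) (prefixes : List String) : List String :=
  if prefixes.isEmpty then []
  else
    let normalized_path := normalize_relative_path_py relative_path
    if normalized_path == "" then []
    else
      prefixes.filter (fun prefixx =>
        normalized_path == prefixx || PySem.Str.startswith normalized_path (prefixx ++ "/"))

-- ===== PORT B =====
def matched_prefixes_py_alt (relative_path : String) (prefixes : List String) : List String :=
  if prefixes.isEmpty then []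
  else
    let normalized := normalize_relative_path_py relative_path
    if normalized == "" then []
    else
      let ancestors : PySem.Set String :=
        (PySem.List.enumerate normalized.toList 0).foldl
          (fun s ic => if ic.2 == '/' then PySem.Set.add s (PySem.Str.slice normalized none (some ic.1)) else s)
          (PySem.Set.ofList [normalized])
      prefixes.filter (fun p => PySem.Set.contains ancestors p)

-- ===== PRECONDITION & SPEC =====
def Spec_matched_prefixes_py (relative_path : String) (prefixes : List String) (out : List String) : Prop := out = matched_prefixes_py_alt relative_path prefixes
instance (relative_path : String) (prefixes : List String) (out : List String) : Decidable (Spec_matched_prefixes_py relative_path prefixes out) := by unfold Spec_matched_prefixes_py; infer_instance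

-- ===== CLAIM (what is proved, stated in full; the proofs are below) =====
def Claim_equal_matched_prefixes_py : Prop := ∀ (relative_path : String) (prefixes : List String), Dom_matched_prefixes_py relative_path prefixes → Spec_matched_prefixes_py relative_path prefixes (matched_prefixes_py relative_path prefixes)

-- ===== LEMMAS AND PROOFS =====

-- membership in the conditional-add fold that builds B's ancestor set
theorem mem_foldl_if_add {α β : Type} [BEq α] [LawfulBEq α]
    (c : β → Bool) (f : β → α) (x : α) (l : List β) (s0 : PySem.Set α) :
    (x ∈ l.foldl (fun s b => if c b then PySem.Set.add s (f b) else s) s0) ↔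
      x ∈ s0 ∨ ∃ b ∈ l, c b = true ∧ x = f b := by
  induction l generalizing s0 with
  | nil => simp
  | cons b bs ih =>
    simp only [List.foldl_cons, List.mem_cons, ih]
    by_cases hc : c b = true
    · rw [hc, if_pos rfl, PySem.Set.mem_add]
      constructor
      · rintro (⟨h | h⟩ | ⟨b', hb', hcb', hx⟩)
        · exact Or.inl h
        · exact Or.inr ⟨b, Or.inl rfl, hc, h⟩
        · exact Or.inr ⟨b', Or.inr hb', hcb', hx⟩
      · rintro (h | ⟨b', (rfl | hb'), hcb', hx⟩)
        · exact Or.inl (Or.inl h)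
        · exact Or.inl (Or.inr hx)
        · exact Or.inr ⟨b', hb', hcb', hx⟩
    · rw [if_neg hc]
      constructor
      · rintro (h | ⟨b', hb', hcb', hx⟩)
        · exact Or.inl h
        · exact Or.inr ⟨b', Or.inr hb', hcb', hx⟩
      · rintro (h | ⟨b', (rfl | hb'), hcb', hx⟩)
        · exact Or.inl h
        · exact absurd hcb' hc
        · exact Or.inr ⟨b', hb', hcb', hx⟩

-- q ++ ['/'] is a prefix of cs iff q is cs cut at some '/'
theorem append_slash_prefix_iff (q cs : List Char) :
    (q ++ ['/'] <+: cs) ↔ ∃ k, k < cs.length ∧ cs[k]? = some '/' ∧ q = cs.take k := by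
  constructor
  · rintro ⟨t, ht⟩
    have hcs : cs = q ++ '/' :: t := by simpa using ht.symm
    subst hcs
    refine ⟨q.length, by simp, ?_, ?_⟩
    · rw [List.getElem?_append_right le_rfl]
      simp
    · simp
  · rintro ⟨k, hk, hget, rfl⟩
    have h1 : cs.take (k + 1) = cs.take k ++ ['/'] := by
      rw [List.take_add_one, hget]
      rfl
    rw [← h1]
    exact List.take_prefix _ _

-- A's per-prefix test coincides with membership in B's ancestor set
theorem test_eq_contains (np p : String) :
    (np == p || PySem.Str.startswith np (p ++ "/")) =
      PySem.Set.contains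
        ((PySem.List.enumerate np.toList 0).foldl
          (fun s ic => if ic.2 == '/' then PySem.Set.add s (PySem.Str.slice np none (some ic.1)) else s)
          (PySem.Set.ofList [np])) p := by
  rw [Bool.eq_iff_iff]
  rw [show PySem.Set.contains ((PySem.List.enumerate np.toList 0).foldl
        (fun s ic => if ic.2 == '/' then PySem.Set.add s (PySem.Str.slice np none (some ic.1)) else s)
        (PySem.Set.ofList [np])) p = true ↔
      p ∈ ((PySem.List.enumerate np.toList 0).foldl
        (fun s ic => if ic.2 == '/' then PySem.Set.add s (PySem.Str.slice np none (some ic.1)) else s)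
        (PySem.Set.ofList [np])) from by
    simp [PySem.Set.contains]]
  rw [mem_foldl_if_add]
  simp only [PySem.Set.mem_ofList, List.mem_singleton, Bool.or_eq_true, beq_iff_eq,
    PySem.Str.startswith_eq]
  rw [PySem.Chars.startswith_iff]
  have htl : (p ++ "/").toList = p.toList ++ ['/'] := by simp
  rw [htl, append_slash_prefix_iff]
  constructor
  · rintro (h | ⟨k, hk, hget, hq⟩)
    · exact Or.inl h.symm
    · refine Or.inr ⟨((k : Int), '/'), ?_, by simp, ?_⟩
      · rw [PySem.List.mem_enumerate_iff]
        refine ⟨k, hk, ?_⟩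
        have : np.toList[k] = '/' := by
          have := List.getElem?_eq_getElem hk (l := np.toList)
          rw [this] at hget
          exact (Option.some_inj.mp hget)
        simp [this]
      · rw [← String.toList_inj]
        have : (PySem.Str.slice np none (some ((k : Nat) : Int))).toList = np.toList.take k := by
          simp [PySem.List.slice_to_natCast]
        simpa [this] using hq
  · rintro (h | ⟨ic, hic, hc, rfl⟩)
    · exact Or.inl h.symm
    · rw [PySem.List.mem_enumerate_iff] at hic
      obtain ⟨k, hk, rfl⟩ := hic
      refine Or.inr ⟨k, hk, ?_, ?_⟩
      · rw [List.getElem?_eq_getElem hk]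
        simpa using hc
      · simp [PySem.List.slice_to_natCast]

-- ===== VERDICT (by name: the statement is the Claim_ definition above) =====
theorem matched_prefixes_py_spec : Claim_equal_matched_prefixes_py := by
  intro relative_path prefixes _
  unfold Spec_matched_prefixes_py matched_prefixes_py matched_prefixes_py_alt
  by_cases hpe : prefixes.isEmpty
  · simp [hpe]
  · simp only [if_neg hpe]
    by_cases hnp : normalize_relative_path_py relative_path == ""
    · simp [hnp]
    · simp only [if_neg hnp]
      exact List.filter_congr (fun p _ => test_eq_contains _ p)
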